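-- pv_equiv track=rewrite | github.com/AdamZhouSE/pythonHomework | Code/CodeRecords/2602/60711/269587.py | find
-- ===== SOURCE A (Python) =====
-- def find(M,N,i,j):
--     if i==len(M):
--         return 0
--     elif j==len(N):
--         return 0
--     else:
--         if M[i] == N[j]:
--             return 1 + find(M, N, i + 1, j + 1)
--         else:
--             return 0
-- ===== SOURCE B (Python) =====
-- def find(M, N, i, j):
--     # empty run if either start is already at its end
--     if i == len(M) or j == len(N):
--         return 0
--     # stream the elements each index walk visits and count the common prefix of the
--     # two streams
--     def walk(L, p):
--         while p != len(L):
--             yield L[p]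
--             p += 1
--     count = 0
--     for x, y in zip(walk(M, i), walk(N, j)):
--         if x != y:
--             break
--         count += 1
--     return count
-- ===== Notes on version B (the rewrite author's own statement) =====
-- stated objective: alternative
-- what changed: Replaces the recursion that builds the result as 1+1+...+0 by a stream-and-zip formulation: each index walk becomes a generator yielding the elements it visits, and one loop counts the common prefix of the two zipped streams.
import Mathlib
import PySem

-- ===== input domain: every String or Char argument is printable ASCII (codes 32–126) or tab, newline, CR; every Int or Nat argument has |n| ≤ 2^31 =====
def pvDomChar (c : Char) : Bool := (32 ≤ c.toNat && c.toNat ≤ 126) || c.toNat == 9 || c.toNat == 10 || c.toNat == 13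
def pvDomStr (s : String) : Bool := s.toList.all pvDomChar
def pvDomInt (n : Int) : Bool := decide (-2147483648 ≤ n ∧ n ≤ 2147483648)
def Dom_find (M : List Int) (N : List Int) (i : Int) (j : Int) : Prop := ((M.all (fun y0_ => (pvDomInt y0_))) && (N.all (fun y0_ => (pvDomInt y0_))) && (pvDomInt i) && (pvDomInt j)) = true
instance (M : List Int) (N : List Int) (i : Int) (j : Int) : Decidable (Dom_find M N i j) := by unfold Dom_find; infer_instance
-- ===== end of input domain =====

-- B replaces A's result-building recursion by a stream-and-zip formulation: each index
-- walk is a generator, and one loop counts the common prefix of the two zipped streams.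

-- ===== PORT A =====
-- literal port of A's recursion; the Nat fuel (M.length - i).toNat is only a totality
-- guard (when recursion continues, i < M.length, so the fuel never runs out there);
-- where Python raises IndexError (pyGet? = none) — excluded by Pre_find — the port returns 0.
def findFuel (fuel : Nat) (M : List Int) (N : List Int) (i : Int) (j : Int) : Int :=
  match fuel with
  | 0 => 0
  | fuel + 1 =>
    if i = (M.length : Int) then 0
    else if j = (N.length : Int) then 0
    else
      match PySem.List.pyGet? M i, PySem.List.pyGet? N j with
      | some a, some b => if a = b then 1 + findFuel fuel M N (i + 1) (j + 1) else 0
      | _, _ => 0  -- Python raises IndexError here; excluded by Pre_find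

def find (M : List Int) (N : List Int) (i : Int) (j : Int) : Int :=
  findFuel (((M.length : Int) - i).toNat) M N i j

-- ===== PORT B =====
-- Source B's generator "walk(L, p)": the stream of elements the index walk visits,
-- materialised as a list; the Nat fuel is only a totality guard (the walk stops at
-- p = len(L), so with fuel (len - p).toNat it never runs out where B returns);
-- where Python raises IndexError (pyGet? = none) the port stops the stream.
def walkFuel (fuel : Nat) (L : List Int) (p : Int) : List Int :=
  match fuel with
  | 0 => []
  | fuel + 1 =>
    if p = (L.length : Int) then []
    else
      match PySem.List.pyGet? L p with
      | some x => x :: walkFuel fuel L (p + 1)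
      | none => []  -- Python raises IndexError here; B does not return on such inputs

-- Source B's "for x, y in zip(walk(M, i), walk(N, j)): if x != y: break; count += 1"
def countRun (l : List (Int × Int)) (count : Int) : Int :=
  match l with
  | [] => count
  | (x, y) :: rest => if x ≠ y then count else countRun rest (count + 1)

def find_alt (M : List Int) (N : List Int) (i : Int) (j : Int) : Int :=
  if i = (M.length : Int) ∨ j = (N.length : Int) then 0
  else countRun ((walkFuel (((M.length : Int) - i).toNat) M i).zip
                 (walkFuel (((N.length : Int) - j).toNat) N j)) 0

-- ===== PRECONDITION & SPEC =====
-- Pre_ excludes exactly the inputs on which A raises IndexError: an index outside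
-- [-len, len] that the length-equality guards do not stop.
def Pre_find (M : List Int) (N : List Int) (i : Int) (j : Int) : Prop :=
  ((-(M.length : Int) ≤ i ∧ i ≤ (M.length : Int)) ∧
   (-(N.length : Int) ≤ j ∧ j ≤ (N.length : Int))) ∨
  i = (M.length : Int) ∨ j = (N.length : Int)
instance (M : List Int) (N : List Int) (i : Int) (j : Int) : Decidable (Pre_find M N i j) := by
  unfold Pre_find; infer_instance

def pvWitness_find : List Int × List Int × Int × Int := ([1, 2, 3], [1, 2, 9], 0, 0)

def Spec_find (M : List Int) (N : List Int) (i : Int) (j : Int) (out : Int) : Prop := out = find_alt M N i j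
instance (M : List Int) (N : List Int) (i : Int) (j : Int) (out : Int) : Decidable (Spec_find M N i j out) := by unfold Spec_find; infer_instance

-- ===== CLAIM (what is proved, stated in full; the proofs are below) =====
def Claim_equal_find : Prop := ∀ (M : List Int) (N : List Int) (i : Int) (j : Int), Dom_find M N i j → Pre_find M N i j → Spec_find M N i j (find M N i j)

-- ===== LEMMAS AND PROOFS =====

-- the running counter only shifts the result
theorem countRun_acc (l : List (Int × Int)) (k : Int) :
    countRun l k = k + countRun l 0 := by
  induction l generalizing k with
  | nil => simp [countRun]
  | cons p rest ih =>
    obtain ⟨x, y⟩ := p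
    by_cases h : x = y
    · simp only [countRun, h, ne_eq, not_true_eq_false, if_false]
      rw [ih (k + 1), ih (0 + 1)]; ring
    · simp [countRun, h]

theorem countRun_cons_eq (x y : Int) (l : List (Int × Int)) (c : Int) (h : x = y) :
    countRun ((x, y) :: l) c = countRun l (c + 1) := by
  rw [countRun, if_neg (by simp [h])]

theorem countRun_cons_ne (x y : Int) (l : List (Int × Int)) (c : Int) (h : x ≠ y) :
    countRun ((x, y) :: l) c = c := by
  rw [countRun, if_pos h]

-- one step of the stream: in range, the walk yields exactly the element Python indexes
theorem walk_cons (L : List Int) (p : Int)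
    (h1 : -(L.length : Int) ≤ p) (h2 : p < (L.length : Int)) :
    ∃ x, PySem.List.pyGet? L p = some x ∧
      walkFuel (((L.length : Int) - p).toNat) L p =
        x :: walkFuel (((L.length : Int) - (p + 1)).toNat) L (p + 1) := by
  obtain ⟨x, hx⟩ : ∃ x, PySem.List.pyGet? L p = some x := by
    cases h : PySem.List.pyGet? L p with
    | some x => exact ⟨x, rfl⟩
    | none =>
      rw [PySem.List.pyGet?_eq_none_iff] at h
      exact absurd (by simp [PySem.Raise.InRange]; omega) h
  refine ⟨x, hx, ?_⟩
  rw [(by omega : (((L.length : Int) - p).toNat) = (((L.length : Int) - (p + 1)).toNat) + 1),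
    walkFuel, if_neg (by omega), hx]

-- the stream is empty at the end of the list
theorem walk_len (L : List Int) :
    walkFuel (((L.length : Int) - (L.length : Int)).toNat) L (L.length : Int) = [] := by
  rw [(by omega : (((L.length : Int) - (L.length : Int)).toNat) = 0), walkFuel]

-- main invariant: with enough fuel and in-range indices, A's recursion computes the
-- common-prefix count of the two streams
theorem findFuel_eq_countRun (fuel : Nat) (M : List Int) (N : List Int) (i j : Int)
    (hi1 : -(M.length : Int) ≤ i) (hi2 : i ≤ (M.length : Int))
    (hj1 : -(N.length : Int) ≤ j) (hj2 : j ≤ (N.length : Int))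
    (hf : (fuel : Int) = (M.length : Int) - i) :
    findFuel fuel M N i j =
      countRun ((walkFuel fuel M i).zip (walkFuel (((N.length : Int) - j).toNat) N j)) 0 := by
  induction fuel generalizing i j with
  | zero => simp [findFuel, walkFuel, countRun]
  | succ fuel ih =>
    have hiL : i < (M.length : Int) := by omega
    rw [findFuel, if_neg (by omega : ¬ i = (M.length : Int))]
    by_cases hjK : j = (N.length : Int)
    · subst hjK
      rw [if_pos rfl, walk_len, List.zip_nil_right]
      rfl
    · rw [if_neg hjK]
      have hjK' : j < (N.length : Int) := by omega
      obtain ⟨x, hx, hxs⟩ := walk_cons M i hi1 hiL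
      obtain ⟨y, hy, hys⟩ := walk_cons N j hj1 hjK'
      rw [hx, hy, (by omega : fuel + 1 = (((M.length : Int) - i).toNat)), hxs,
        (by omega : (((M.length : Int) - (i + 1)).toNat) = fuel), hys, List.zip_cons_cons]
      show (if x = y then 1 + findFuel fuel M N (i + 1) (j + 1) else 0) = _
      by_cases hxy : x = y
      · rw [if_pos hxy, countRun_cons_eq _ _ _ _ hxy, countRun_acc _ (0 + 1),
          ih (i + 1) (j + 1) (by omega) (by omega) (by omega) (by omega) (by omega)]
        ring
      · rw [if_neg hxy, countRun_cons_ne _ _ _ _ hxy]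

-- A's recursion returns 0 whenever j is already at the end of N
theorem findFuel_at_len (fuel : Nat) (M : List Int) (N : List Int) (i : Int) :
    findFuel fuel M N i (N.length : Int) = 0 := by
  cases fuel with
  | zero => rfl
  | succ fuel =>
    rw [findFuel]
    by_cases hi : i = (M.length : Int)
    · rw [if_pos hi]
    · rw [if_neg hi, if_pos rfl]

-- ===== VERDICT (by name: the statement is the Claim_ definition above) =====
theorem find_spec : Claim_equal_find := by
  intro M N i j _ hpre
  unfold Spec_find find find_alt
  by_cases hi : i = (M.length : Int)
  · subst hi
    rw [if_pos (Or.inl rfl)]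
    simp [findFuel]
  · by_cases hj : j = (N.length : Int)
    · subst hj
      rw [if_pos (Or.inr rfl), findFuel_at_len]
    · rw [if_neg (by tauto)]
      rcases hpre with ⟨⟨hi1, hi2⟩, hj1, hj2⟩ | h | h
      · exact findFuel_eq_countRun _ M N i j hi1 hi2 hj1 hj2 (by omega)
      · exact absurd h hi
      · exact absurd h hj
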